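-- pv_equiv track=rewrite | github.com/ziqingchuan/docx2md | word2xml2md_final.py | merge_superscripts_subscripts
-- ===== SOURCE A (Python) =====
-- def merge_superscripts_subscripts(content_items):
--     merged = []
--     i = 0
--     while i < len(content_items):
--         ttype, cont = content_items[i]
--         if ttype == 'text':
--             base = cont
--             sup = ''
--             sub = ''
--             j = i + 1
--             while j < len(content_items):
--                 nt, nc = content_items[j]
--                 if nt == 'superscript':
--                     sup += nc
--                     j += 1
--                 elif nt == 'subscript':
--                     sub += nc
--                     j += 1
--                 else:
--                     break
--             if sup or sub:
--                 expr = base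
--                 if sub and sup:
--                     expr = expr + '_{' + sub + '}^{' + sup + '}'
--                 elif sub:
--                     expr = expr + '_{' + sub + '}'
--                 elif sup:
--                     expr = expr + '^{' + sup + '}'
--                 merged.append(('math', expr))
--                 i = j
--             else:
--                 merged.append((ttype, cont))
--                 i += 1
--         else:
--             if ttype == 'math':
--                 merged.append(('math', cont))
--             elif ttype == 'superscript':
--                 merged.append(('math', '^{' + cont + '}'))
--             elif ttype == 'subscript':
--                 merged.append(('math', '_{' + cont + '}'))
--             else:
--                 merged.append((ttype, cont))
--             i += 1
--     return merged
-- ===== SOURCE B (Python) =====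
-- def merge_superscripts_subscripts(content_items):
--     out = []
--     base = None
--     run = []
--
--     def standalone(t, c):
--         if t == 'math':
--             out.append(('math', c))
--         elif t == 'superscript':
--             out.append(('math', '^{' + c + '}'))
--         elif t == 'subscript':
--             out.append(('math', '_{' + c + '}'))
--         else:
--             out.append((t, c))
--
--     def flush():
--         nonlocal base, run
--         if base is not None:
--             sup = ''.join(c for t, c in run if t == 'superscript')
--             sub = ''.join(c for t, c in run if t == 'subscript')
--             if sup and sub:
--                 out.append(('math', base + '_{' + sub + '}^{' + sup + '}'))
--             elif sub:
--                 out.append(('math', base + '_{' + sub + '}'))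
--             elif sup:
--                 out.append(('math', base + '^{' + sup + '}'))
--             else:
--                 out.append(('text', base))
--                 for t, c in run:
--                     standalone(t, c)
--         base, run = None, []
--
--     for t, c in content_items:
--         if t == 'text':
--             flush()
--             base = c
--         elif t in ('superscript', 'subscript') and base is not None:
--             run.append((t, c))
--         else:
--             flush()
--             standalone(t, c)
--     flush()
--     return out
-- ===== Notes on version B (the rewrite author's own statement) =====
-- stated objective: alternative
-- what changed: Replaced A's index-based while loop with a nested look-ahead scan by a single flat for-loop that buffers the pending text base and its following script run in accumulator state and formats it on flush (next text/other item or end of input).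
import Mathlib
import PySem

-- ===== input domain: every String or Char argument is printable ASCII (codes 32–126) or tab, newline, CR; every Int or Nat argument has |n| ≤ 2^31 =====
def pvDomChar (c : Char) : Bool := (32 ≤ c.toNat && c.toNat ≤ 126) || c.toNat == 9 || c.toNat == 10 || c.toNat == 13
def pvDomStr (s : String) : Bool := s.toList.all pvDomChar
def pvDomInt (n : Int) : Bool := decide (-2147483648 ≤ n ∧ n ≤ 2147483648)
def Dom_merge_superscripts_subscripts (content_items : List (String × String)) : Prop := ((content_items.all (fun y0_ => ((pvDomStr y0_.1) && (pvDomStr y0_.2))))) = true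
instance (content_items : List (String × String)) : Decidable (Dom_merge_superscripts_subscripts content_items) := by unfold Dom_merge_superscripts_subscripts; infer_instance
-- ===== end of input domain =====

-- B is an alternative decomposition: one flat loop with pending base/run accumulator state
-- instead of A's index-based while loop with an inner look-ahead scan; same cost, return value proved equal.

-- ===== PORT A =====
-- A's inner while loop: consume the run of superscript/subscript items after a text item,
-- accumulating sup and sub; returns (sup, sub, remaining items).
def pvScanA : List (String × String) → String → String → String × String × List (String × String)
  | [], sup, sub => (sup, sub, [])
  | (nt, nc) :: rest, sup, sub =>
    if nt = "superscript" then pvScanA rest (sup ++ nc) sub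
    else if nt = "subscript" then pvScanA rest sup (sub ++ nc)
    else (sup, sub, (nt, nc) :: rest)

-- needed by the port's decreasing_by: the scan only consumes items
theorem pvScanA_length_le : ∀ (l : List (String × String)) (sup sub : String),
    (pvScanA l sup sub).2.2.length ≤ l.length := by
  intro l
  induction l with
  | nil => intro sup sub; simp [pvScanA]
  | cons p rest ih =>
    intro sup sub
    obtain ⟨nt, nc⟩ := p
    simp only [pvScanA]
    split_ifs with h1 h2
    · exact Nat.le_succ_of_le (ih _ _)
    · exact Nat.le_succ_of_le (ih _ _)
    · simp

def merge_superscripts_subscripts (content_items : List (String × String)) : List (String × String) :=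
  match content_items with
  | [] => []
  | (ttype, cont) :: rest =>
    if ttype = "text" then
      let r := pvScanA rest "" ""
      if r.1 ≠ "" ∨ r.2.1 ≠ "" then
        -- expr built exactly as in A: base, then the sub/sup cases in A's order
        ("math",
          if r.2.1 ≠ "" ∧ r.1 ≠ "" then cont ++ "_{" ++ r.2.1 ++ "}^{" ++ r.1 ++ "}"
          else if r.2.1 ≠ "" then cont ++ "_{" ++ r.2.1 ++ "}"
          else if r.1 ≠ "" then cont ++ "^{" ++ r.1 ++ "}"
          else cont) :: merge_superscripts_subscripts r.2.2
      else (ttype, cont) :: merge_superscripts_subscripts rest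
    else
      (if ttype = "math" then ("math", cont)
       else if ttype = "superscript" then ("math", "^{" ++ cont ++ "}")
       else if ttype = "subscript" then ("math", "_{" ++ cont ++ "}")
       else (ttype, cont)) :: merge_superscripts_subscripts rest
termination_by content_items.length
decreasing_by
  · exact Nat.lt_succ_of_le (pvScanA_length_le rest "" "")
  · exact Nat.lt_succ_self _
  · exact Nat.lt_succ_self _

-- ===== PORT B =====
-- B's standalone(t, c): emit an item on its own
def pvStandaloneB (p : String × String) : String × String :=
  if p.1 = "math" then ("math", p.2)
  else if p.1 = "superscript" then ("math", "^{" ++ p.2 ++ "}")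
  else if p.1 = "subscript" then ("math", "_{" ++ p.2 ++ "}")
  else p

-- ''.join(c for t, c in run if t == 'superscript')  (resp. 'subscript')
def pvJoinSup (run : List (String × String)) : String :=
  (((run.filter (fun p => p.1 == "superscript")).map Prod.snd).foldl (· ++ ·) "")
def pvJoinSub (run : List (String × String)) : String :=
  (((run.filter (fun p => p.1 == "subscript")).map Prod.snd).foldl (· ++ ·) "")

-- B's flush(): items emitted for the pending (base, run) state
def pvFlushB (base : Option String) (run : List (String × String)) : List (String × String) :=
  match base with
  | none => []
  | some b =>
    let sup := pvJoinSup run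
    let sub := pvJoinSub run
    if sup ≠ "" ∧ sub ≠ "" then [("math", b ++ "_{" ++ sub ++ "}^{" ++ sup ++ "}")]
    else if sub ≠ "" then [("math", b ++ "_{" ++ sub ++ "}")]
    else if sup ≠ "" then [("math", b ++ "^{" ++ sup ++ "}")]
    else ("text", b) :: run.map pvStandaloneB

-- B's loop body over state (out, base, run)
def pvStepB (st : List (String × String) × Option String × List (String × String))
    (p : String × String) : List (String × String) × Option String × List (String × String) :=
  if p.1 = "text" then (st.1 ++ pvFlushB st.2.1 st.2.2, some p.2, [])
  else if (p.1 = "superscript" ∨ p.1 = "subscript") ∧ st.2.1.isSome then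
    (st.1, st.2.1, st.2.2 ++ [p])
  else (st.1 ++ pvFlushB st.2.1 st.2.2 ++ [pvStandaloneB p], none, [])

def merge_superscripts_subscripts_alt (content_items : List (String × String)) : List (String × String) :=
  let st := content_items.foldl pvStepB ([], none, [])
  st.1 ++ pvFlushB st.2.1 st.2.2

-- ===== PRECONDITION & SPEC =====
def Spec_merge_superscripts_subscripts (content_items : List (String × String)) (out : List (String × String)) : Prop := out = merge_superscripts_subscripts_alt content_items
instance (content_items : List (String × String)) (out : List (String × String)) : Decidable (Spec_merge_superscripts_subscripts content_items out) := by unfold Spec_merge_superscripts_subscripts; infer_instance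

-- ===== CLAIM (what is proved, stated in full; the proofs are below) =====
def Claim_equal_merge_superscripts_subscripts : Prop := ∀ (content_items : List (String × String)), Dom_merge_superscripts_subscripts content_items → Spec_merge_superscripts_subscripts content_items (merge_superscripts_subscripts content_items)

-- ===== LEMMAS AND PROOFS =====

-- the output already produced is a pure prefix: folding only appends to it
theorem pvFoldB_shift : ∀ (l : List (String × String)) (extra out : List (String × String))
    (b : Option String) (r : List (String × String)),
    l.foldl pvStepB (extra ++ out, b, r) =
      ((extra ++ (l.foldl pvStepB (out, b, r)).1),
       (l.foldl pvStepB (out, b, r)).2.1, (l.foldl pvStepB (out, b, r)).2.2) := by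
  intro l
  induction l with
  | nil => intro extra out b r; simp
  | cons p rest ih =>
    intro extra out b r
    have hstep : pvStepB (extra ++ out, b, r) p =
        (extra ++ (pvStepB (out, b, r) p).1, (pvStepB (out, b, r) p).2.1,
          (pvStepB (out, b, r) p).2.2) := by
      simp only [pvStepB]
      split_ifs <;> simp
    simp only [List.foldl_cons, hstep]
    exact ih _ _ _ _

theorem pvJoinSup_append (run : List (String × String)) (t c : String) :
    pvJoinSup (run ++ [(t, c)]) =
      if t = "superscript" then pvJoinSup run ++ c else pvJoinSup run := by
  simp only [pvJoinSup, List.filter_append, List.map_append, List.foldl_append]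
  split_ifs with h <;> simp [h]

theorem pvJoinSub_append (run : List (String × String)) (t c : String) :
    pvJoinSub (run ++ [(t, c)]) =
      if t = "subscript" then pvJoinSub run ++ c else pvJoinSub run := by
  simp only [pvJoinSub, List.filter_append, List.map_append, List.foldl_append]
  split_ifs with h <;> simp [h]


-- a non-text head with no pending base is emitted standalone by B
theorem pvAlt_cons_nontext (t c : String) (xs : List (String × String)) (ht : t ≠ "text") :
    merge_superscripts_subscripts_alt ((t, c) :: xs) =
      pvStandaloneB (t, c) :: merge_superscripts_subscripts_alt xs := by
  have hstep : pvStepB (([], none, []) : List (String × String) × Option String × List (String × String)) (t, c) =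
      ([pvStandaloneB (t, c)], none, []) := by
    simp [pvStepB, ht, pvFlushB]
  simp only [merge_superscripts_subscripts_alt, List.foldl_cons, hstep]
  rw [show ([pvStandaloneB (t, c)], (none : Option String), ([] : List (String × String))) =
      ([pvStandaloneB (t, c)] ++ [], (none : Option String), ([] : List (String × String))) by simp,
    pvFoldB_shift]
  simp

-- B's flush for a pending base, phrased through the joined sup/sub strings
theorem pvFlushB_some (b : String) (run : List (String × String)) :
    pvFlushB (some b) run =
      if pvJoinSup run ≠ "" ∨ pvJoinSub run ≠ "" then
        [("math",
          if pvJoinSub run ≠ "" ∧ pvJoinSup run ≠ "" then b ++ "_{" ++ pvJoinSub run ++ "}^{" ++ pvJoinSup run ++ "}"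
          else if pvJoinSub run ≠ "" then b ++ "_{" ++ pvJoinSub run ++ "}"
          else if pvJoinSup run ≠ "" then b ++ "^{" ++ pvJoinSup run ++ "}"
          else b)]
      else ("text", b) :: run.map pvStandaloneB := by
  simp only [pvFlushB]
  split_ifs <;> first | rfl | tauto

-- the scan only appends to its accumulators
theorem pvScanA_acc : ∀ (l : List (String × String)) (s t : String),
    ∃ u v, (pvScanA l s t).1 = s ++ u ∧ (pvScanA l s t).2.1 = t ++ v := by
  intro l
  induction l with
  | nil => intro s t; exact ⟨"", "", by simp [pvScanA], by simp [pvScanA]⟩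
  | cons p xs ih =>
    intro s t
    obtain ⟨nt, nc⟩ := p
    simp only [pvScanA]
    split_ifs with h1 h2
    · obtain ⟨u, v, hu, hv⟩ := ih (s ++ nc) t
      exact ⟨nc ++ u, v, by rw [hu, String.append_assoc], hv⟩
    · obtain ⟨u, v, hu, hv⟩ := ih s (t ++ nc)
      exact ⟨u, nc ++ v, hu, by rw [hv, String.append_assoc]⟩
    · exact ⟨"", "", by simp, by simp⟩

-- B with a pending text base and script run, described through A's scan of the remaining input
theorem pvMainB : ∀ (l : List (String × String)) (b : String) (run : List (String × String)),
    (let r := pvScanA l (pvJoinSup run) (pvJoinSub run)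
     let st := l.foldl pvStepB ([], some b, run)
     st.1 ++ pvFlushB st.2.1 st.2.2 =
       if r.1 ≠ "" ∨ r.2.1 ≠ "" then
         ("math",
           if r.2.1 ≠ "" ∧ r.1 ≠ "" then b ++ "_{" ++ r.2.1 ++ "}^{" ++ r.1 ++ "}"
           else if r.2.1 ≠ "" then b ++ "_{" ++ r.2.1 ++ "}"
           else if r.1 ≠ "" then b ++ "^{" ++ r.1 ++ "}"
           else b) :: merge_superscripts_subscripts_alt r.2.2
       else ("text", b) :: run.map pvStandaloneB ++ merge_superscripts_subscripts_alt l) := by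
  intro l
  induction l with
  | nil =>
    intro b run
    simp only [List.foldl_nil, pvScanA, pvFlushB_some]
    simp [merge_superscripts_subscripts_alt, pvFlushB]
  | cons p xs ih =>
    intro b run
    obtain ⟨t, c⟩ := p
    by_cases hsup : t = "superscript"
    · subst hsup
      have hstep : pvStepB (([], some b, run) : List (String × String) × Option String × List (String × String)) ("superscript", c) =
          ([], some b, run ++ [("superscript", c)]) := by
        simp [pvStepB]
      simp only [List.foldl_cons, hstep]
      rw [show pvScanA (("superscript", c) :: xs) (pvJoinSup run) (pvJoinSub run) =
          pvScanA xs (pvJoinSup run ++ c) (pvJoinSub run) by simp [pvScanA]]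
      have h1 : pvJoinSup (run ++ [("superscript", c)]) = pvJoinSup run ++ c := by
        simp [pvJoinSup_append]
      have h2 : pvJoinSub (run ++ [("superscript", c)]) = pvJoinSub run := by
        rw [pvJoinSub_append, if_neg (by decide)]
      have hIH := ih b (run ++ [("superscript", c)])
      rw [h1, h2] at hIH
      rw [hIH]
      by_cases hc : c = ""
      · subst hc
        simp only [String.append_empty]
        by_cases hor : (pvScanA xs (pvJoinSup run) (pvJoinSub run)).1 ≠ "" ∨
            (pvScanA xs (pvJoinSup run) (pvJoinSub run)).2.1 ≠ ""
        · rw [if_pos hor, if_pos hor]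
        · rw [if_neg hor, if_neg hor, pvAlt_cons_nontext "superscript" "" xs (by decide)]
          simp [pvStandaloneB]
      · have hne : pvJoinSup run ++ c ≠ "" := fun h => hc (String.append_eq_empty_iff.mp h).2
        obtain ⟨u, v, hu, hv⟩ := pvScanA_acc xs (pvJoinSup run ++ c) (pvJoinSub run)
        have hcond : (pvScanA xs (pvJoinSup run ++ c) (pvJoinSub run)).1 ≠ "" := by
          rw [hu]; intro h; exact hne (String.append_eq_empty_iff.mp h).1
        rw [if_pos (Or.inl hcond), if_pos (Or.inl hcond)]
    · by_cases hsub : t = "subscript"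
      · subst hsub
        have hstep : pvStepB (([], some b, run) : List (String × String) × Option String × List (String × String)) ("subscript", c) =
            ([], some b, run ++ [("subscript", c)]) := by
          simp [pvStepB]
        simp only [List.foldl_cons, hstep]
        rw [show pvScanA (("subscript", c) :: xs) (pvJoinSup run) (pvJoinSub run) =
            pvScanA xs (pvJoinSup run) (pvJoinSub run ++ c) by simp [pvScanA]]
        have h1 : pvJoinSup (run ++ [("subscript", c)]) = pvJoinSup run := by
          rw [pvJoinSup_append, if_neg (by decide)]
        have h2 : pvJoinSub (run ++ [("subscript", c)]) = pvJoinSub run ++ c := by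
          simp [pvJoinSub_append]
        have hIH := ih b (run ++ [("subscript", c)])
        rw [h1, h2] at hIH
        rw [hIH]
        by_cases hc : c = ""
        · subst hc
          simp only [String.append_empty]
          by_cases hor : (pvScanA xs (pvJoinSup run) (pvJoinSub run)).1 ≠ "" ∨
              (pvScanA xs (pvJoinSup run) (pvJoinSub run)).2.1 ≠ ""
          · rw [if_pos hor, if_pos hor]
          · rw [if_neg hor, if_neg hor, pvAlt_cons_nontext "subscript" "" xs (by decide)]
            simp [pvStandaloneB]
        · have hne : pvJoinSub run ++ c ≠ "" := fun h => hc (String.append_eq_empty_iff.mp h).2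
          obtain ⟨u, v, hu, hv⟩ := pvScanA_acc xs (pvJoinSup run) (pvJoinSub run ++ c)
          have hcond : (pvScanA xs (pvJoinSup run) (pvJoinSub run ++ c)).2.1 ≠ "" := by
            rw [hv]; intro h; exact hne (String.append_eq_empty_iff.mp h).1
          rw [if_pos (Or.inr hcond), if_pos (Or.inr hcond)]
      · -- t is neither superscript nor subscript: A's scan stops here
        have hscan : pvScanA ((t, c) :: xs) (pvJoinSup run) (pvJoinSub run) =
            (pvJoinSup run, pvJoinSub run, (t, c) :: xs) := by
          simp [pvScanA, hsup, hsub]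
        rw [hscan]
        by_cases ht : t = "text"
        · subst ht
          have hstep : pvStepB (([], some b, run) : List (String × String) × Option String × List (String × String)) ("text", c) =
              (pvFlushB (some b) run, some c, []) := by
            simp [pvStepB]
          simp only [List.foldl_cons, hstep]
          have halt : merge_superscripts_subscripts_alt (("text", c) :: xs) =
              (xs.foldl pvStepB ([], some c, [])).1 ++
                pvFlushB (xs.foldl pvStepB ([], some c, [])).2.1 (xs.foldl pvStepB ([], some c, [])).2.2 := by
            simp [merge_superscripts_subscripts_alt, pvStepB, pvFlushB]
          rw [show (pvFlushB (some b) run, some c, ([] : List (String × String))) =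
              (pvFlushB (some b) run ++ [], some c, ([] : List (String × String))) by simp,
            pvFoldB_shift]
          simp only [List.append_assoc]
          rw [← halt, pvFlushB_some]
          by_cases hor : pvJoinSup run ≠ "" ∨ pvJoinSub run ≠ ""
          · rw [if_pos hor, if_pos hor]; simp
          · rw [if_neg hor, if_neg hor]
        · -- other type: B flushes and emits standalone
          have hstep : pvStepB (([], some b, run) : List (String × String) × Option String × List (String × String)) (t, c) =
              (pvFlushB (some b) run ++ [pvStandaloneB (t, c)], none, []) := by
            simp only [pvStepB, if_neg ht]
            rw [if_neg (by simp [hsup, hsub])]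
            simp
          simp only [List.foldl_cons, hstep]
          rw [show (pvFlushB (some b) run ++ [pvStandaloneB (t, c)], (none : Option String), ([] : List (String × String))) =
              ((pvFlushB (some b) run ++ [pvStandaloneB (t, c)]) ++ [], (none : Option String), ([] : List (String × String))) by simp,
            pvFoldB_shift]
          simp only [List.append_assoc, List.singleton_append]
          have hxsalt : (List.foldl pvStepB ([], none, []) xs).1 ++
              pvFlushB (List.foldl pvStepB ([], none, []) xs).2.1
                (List.foldl pvStepB ([], none, []) xs).2.2 =
              merge_superscripts_subscripts_alt xs := rfl
          simp only [pvAlt_cons_nontext t c xs ht, pvFlushB_some]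
          by_cases hor : pvJoinSup run ≠ "" ∨ pvJoinSub run ≠ ""
          · rw [if_pos hor, if_pos hor]
            simp
            exact hxsalt
          · rw [if_neg hor, if_neg hor]
            simp
            exact hxsalt

-- equality of the two ports, by strong induction on the length
theorem pvEqAux : ∀ (n : Nat) (l : List (String × String)), l.length ≤ n →
    merge_superscripts_subscripts l = merge_superscripts_subscripts_alt l := by
  intro n
  induction n with
  | zero =>
    intro l hl
    have : l = [] := List.eq_nil_of_length_eq_zero (Nat.le_zero.mp hl)
    subst this
    simp [merge_superscripts_subscripts, merge_superscripts_subscripts_alt, pvFlushB]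
  | succ n ih =>
    intro l hl
    cases l with
    | nil => simp [merge_superscripts_subscripts, merge_superscripts_subscripts_alt, pvFlushB]
    | cons p xs =>
      obtain ⟨t, c⟩ := p
      have hxs : xs.length ≤ n := by simpa using Nat.lt_succ_iff.mp (Nat.lt_of_lt_of_le (by simp) hl)
      by_cases ht : t = "text"
      · subst ht
        have halt : merge_superscripts_subscripts_alt (("text", c) :: xs) =
            (xs.foldl pvStepB ([], some c, [])).1 ++
              pvFlushB (xs.foldl pvStepB ([], some c, [])).2.1 (xs.foldl pvStepB ([], some c, [])).2.2 := by
          simp [merge_superscripts_subscripts_alt, pvStepB, pvFlushB]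
        have hmain := pvMainB xs c []
        simp only [pvJoinSup, pvJoinSub, List.filter_nil, List.map_nil, List.foldl_nil] at hmain
        rw [halt, hmain]
        simp only [merge_superscripts_subscripts, String.reduceEq, reduceIte]
        rw [ih xs hxs, ih _ (le_trans (pvScanA_length_le xs "" "") hxs)]
        by_cases hor : (pvScanA xs "" "").1 ≠ "" ∨ (pvScanA xs "" "").2.1 ≠ ""
        · rw [if_pos hor, if_pos hor]
        · rw [if_neg hor, if_neg hor]
          simp
      · rw [pvAlt_cons_nontext t c xs ht]
        simp only [merge_superscripts_subscripts, if_neg ht]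
        rw [ih _ hxs]
        simp only [pvStandaloneB]

-- ===== VERDICT (by name: the statement is the Claim_ definition above) =====
theorem merge_superscripts_subscripts_spec : Claim_equal_merge_superscripts_subscripts := by
  intro l _
  unfold Spec_merge_superscripts_subscripts
  exact pvEqAux l.length l le_rfl
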